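-- pv_equiv track=rewrite | github.com/21pd38/Transportation-Problem-Python | scl project.py | check_assignment_matrix
-- ===== SOURCE A (Python) =====
-- def transpose(matrix):
--     matrixt = []
--     for i in range(len(matrix[0])):
--         temp = []
--         for j in range(len(matrix)):
--             temp.append(matrix[j][i])
--         matrixt.append(temp)
--     return matrixt
--
-- def check_assignment_matrix(matrixt):
--     for i in range(len(matrixt)):
--         if 0 in matrixt[i]:
--             continue
--         else:
--             return False
--     matrixt = transpose(matrixt)
--     for i in range(len(matrixt)):
--         if 0 in matrixt[i]:
--             continue
--         else:
--             return False
--     return True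
-- ===== SOURCE B (Python) =====
-- def check_assignment_matrix(matrixt):
--     for row in matrixt:
--         if 0 not in row:
--             return False
--     ncols = len(matrixt[0])
--     has_zero = [False] * ncols
--     for i in range(len(matrixt)):
--         for j in range(ncols):
--             if matrixt[i][j] == 0:
--                 has_zero[j] = True
--     return all(has_zero)
-- ===== Notes on version B (the rewrite author's own statement) =====
-- stated objective: simpler
-- what changed: Instead of materialising the transpose and re-running the row check on it, B keeps a per-column boolean array and marks columns while scanning the rows once, finishing with all(has_zero).
import Mathlib
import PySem

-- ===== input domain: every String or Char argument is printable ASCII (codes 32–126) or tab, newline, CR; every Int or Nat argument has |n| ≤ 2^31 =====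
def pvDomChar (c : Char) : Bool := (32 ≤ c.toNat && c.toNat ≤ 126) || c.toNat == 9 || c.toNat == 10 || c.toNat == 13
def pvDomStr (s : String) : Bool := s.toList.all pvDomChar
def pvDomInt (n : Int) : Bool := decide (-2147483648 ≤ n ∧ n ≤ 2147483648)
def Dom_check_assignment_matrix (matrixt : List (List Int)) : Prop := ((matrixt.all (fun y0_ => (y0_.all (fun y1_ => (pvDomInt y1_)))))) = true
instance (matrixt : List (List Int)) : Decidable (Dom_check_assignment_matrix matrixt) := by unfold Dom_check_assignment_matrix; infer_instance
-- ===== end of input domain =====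

-- B replaces A's materialised transpose + second row scan by one boolean array of
-- per-column "has a zero" flags filled in a single nested pass (simpler: O(m) extra space).

-- ===== PORT A =====
-- inner loop of transpose: temp = [matrix[j][i] for j in range(len(matrix))]; none = IndexError
def pvColA? : List (List Int) → Int → Option (List Int)
  | [], _ => some []
  | r :: rs, i =>
    match PySem.List.pyGet? r i with
    | none => none
    | some v =>
      match pvColA? rs i with
      | none => none
      | some t => some (v :: t)

-- outer loop of transpose over the column indices range(len(matrix[0]))
def pvTransColsA? (m : List (List Int)) : List Nat → Option (List (List Int))
  | [] => some []
  | i :: is =>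
    match pvColA? m (i : Int) with
    | none => none
    | some c =>
      match pvTransColsA? m is with
      | none => none
      | some t => some (c :: t)

-- the loop 'for i in range(len(matrixt)): if 0 in matrixt[i]: continue else: return False'
def pvRowsCheckA : List (List Int) → Bool
  | [] => true
  | r :: rs => if (0 : Int) ∈ r then pvRowsCheckA rs else false

def check_assignment_matrix (matrixt : List (List Int)) : Bool :=
  if pvRowsCheckA matrixt then
    match matrixt.head? with            -- matrix[0]: none = IndexError on []
    | none => false                     -- unreachable under Pre_
    | some r0 =>
      match pvTransColsA? matrixt (List.range r0.length) with
      | none => false                   -- IndexError on a too-short row: unreachable under Pre_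
      | some t => pvRowsCheckA t
  else false

-- ===== PORT B =====
-- inner loop: for j in range(ncols): if matrixt[i][j] == 0: has_zero[j] = True
def pvMarkRowB : List Int → List Nat → List Bool → Option (List Bool)
  | _, [], flags => some flags
  | row, j :: js, flags =>
    match PySem.List.pyGet? row (j : Int) with
    | none => none                      -- IndexError
    | some v => pvMarkRowB row js (if v = 0 then flags.set j true else flags)

-- outer loop over the rows
def pvMarkRowsB (js : List Nat) : List (List Int) → List Bool → Option (List Bool)
  | [], flags => some flags
  | r :: rs, flags =>
    match pvMarkRowB r js flags with
    | none => none
    | some f => pvMarkRowsB js rs f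

def check_assignment_matrix_alt (matrixt : List (List Int)) : Bool :=
  if matrixt.all (fun row => decide ((0 : Int) ∈ row)) then
    match matrixt.head? with            -- len(matrixt[0]): none = IndexError on []
    | none => false                     -- unreachable under Pre_
    | some r0 =>
      match pvMarkRowsB (List.range r0.length) matrixt (List.replicate r0.length false) with
      | none => false                   -- IndexError: unreachable under Pre_
      | some flags => flags.all (fun b => b)
  else false

-- ===== PRECONDITION & SPEC =====
-- Pre_ excludes exactly the inputs where A raises IndexError (B raises there too):
-- every row contains a zero and the matrix is empty or some row is shorter than row 0.
def Pre_check_assignment_matrix (matrixt : List (List Int)) : Prop :=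
  (∃ row ∈ matrixt, (0 : Int) ∉ row) ∨
  (matrixt ≠ [] ∧ ∀ row ∈ matrixt, (matrixt.headD []).length ≤ row.length)
instance (matrixt : List (List Int)) : Decidable (Pre_check_assignment_matrix matrixt) := by
  unfold Pre_check_assignment_matrix; infer_instance

def pvWitness_check_assignment_matrix : List (List Int) := [[0, 1], [2, 0]]

def Spec_check_assignment_matrix (matrixt : List (List Int)) (out : Bool) : Prop := out = check_assignment_matrix_alt matrixt
instance (matrixt : List (List Int)) (out : Bool) : Decidable (Spec_check_assignment_matrix matrixt out) := by unfold Spec_check_assignment_matrix; infer_instance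

-- ===== CLAIM (what is proved, stated in full; the proofs are below) =====
def Claim_equal_check_assignment_matrix : Prop := ∀ (matrixt : List (List Int)), Dom_check_assignment_matrix matrixt → Pre_check_assignment_matrix matrixt → Spec_check_assignment_matrix matrixt (check_assignment_matrix matrixt)

-- ===== LEMMAS AND PROOFS =====

theorem pvRowsCheckA_eq_all (m : List (List Int)) :
    pvRowsCheckA m = m.all (fun row => decide ((0 : Int) ∈ row)) := by
  induction m with
  | nil => rfl
  | cons r rs ih =>
    by_cases h : (0 : Int) ∈ r <;> simp [pvRowsCheckA, h, ih]

theorem pvColA?_eq (j : Nat) (m : List (List Int)) (h : ∀ r ∈ m, j < r.length) :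
    pvColA? m (j : Int) = some (m.map (fun r => r.getD j 0)) := by
  induction m with
  | nil => rfl
  | cons r rs ih =>
    have hj : j < r.length := h r (by simp)
    have : PySem.List.pyGet? r (j : Int) = some (r.getD j 0) := by
      simp [pysem, List.getElem?_eq_getElem hj, List.getD]
    rw [pvColA?, this, ih (fun r hr => h r (by simp [hr]))]
    simp

theorem pvTransColsA?_eq (m : List (List Int)) (js : List Nat)
    (h : ∀ j ∈ js, ∀ r ∈ m, j < r.length) :
    pvTransColsA? m js = some (js.map (fun j => m.map (fun r => r.getD j 0))) := by
  induction js with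
  | nil => rfl
  | cons j js ih =>
    rw [pvTransColsA?, pvColA?_eq j m (h j (by simp)),
      ih (fun j' hj' => h j' (by simp [hj']))]
    simp

theorem pvMarkRowB_eq (row : List Int) (js : List Nat) (flags : List Bool)
    (hrow : ∀ j ∈ js, j < row.length) :
    ∃ f, pvMarkRowB row js flags = some f ∧ f.length = flags.length ∧
      ∀ k, k < flags.length →
        f.getD k false = (flags.getD k false ||
          (decide (k ∈ js) && decide (row.getD k 0 = 0))) := by
  induction js generalizing flags with
  | nil => exact ⟨flags, rfl, rfl, by simp⟩
  | cons j js ih =>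
    have hj : j < row.length := hrow j (by simp)
    have hget : PySem.List.pyGet? row (j : Int) = some (row.getD j 0) := by
      simp [pysem, List.getElem?_eq_getElem hj, List.getD]
    set flags' := if row.getD j 0 = 0 then flags.set j true else flags with hflags'
    have hlen' : flags'.length = flags.length := by
      rw [hflags']; split <;> simp
    obtain ⟨f, hf, hfl, hfk⟩ := ih flags' (fun j' hj' => hrow j' (by simp [hj']))
    refine ⟨f, ?_, by omega, ?_⟩
    · rw [pvMarkRowB, hget]; exact hf
    · intro k hk
      rw [hfk k (by omega)]
      by_cases hkj : k = j
      · subst hkj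
        by_cases hz : row.getD k 0 = 0
        · have h1 : flags'.getD k false = true := by
            rw [hflags', if_pos hz]
            simp [List.getD, hk]
          rw [h1]
          simp only [List.getD] at hz
          simp [hz]
        · rw [hflags', if_neg hz]
          simp only [List.getD] at hz
          simp [hz]
      · have hrest : flags'.getD k false = flags.getD k false := by
          rw [hflags']; split
          · simp [List.getD, List.getElem?_set_ne (by omega : j ≠ k)]
          · rfl
        rw [hrest]
        simp [hkj]

theorem pvMarkRowsB_eq (js : List Nat) (m : List (List Int)) (flags : List Bool)
    (hrow : ∀ r ∈ m, ∀ j ∈ js, j < r.length) :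
    ∃ f, pvMarkRowsB js m flags = some f ∧ f.length = flags.length ∧
      ∀ k, k < flags.length →
        f.getD k false = (flags.getD k false ||
          (decide (k ∈ js) && m.any (fun r => decide (r.getD k 0 = 0)))) := by
  induction m generalizing flags with
  | nil => exact ⟨flags, rfl, rfl, by simp⟩
  | cons r rs ih =>
    obtain ⟨f1, hf1, hl1, hk1⟩ := pvMarkRowB_eq r js flags (hrow r (by simp))
    obtain ⟨f, hf, hl, hk⟩ := ih f1 (fun r' hr' => hrow r' (by simp [hr']))
    refine ⟨f, by rw [pvMarkRowsB, hf1]; exact hf, by omega, ?_⟩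
    intro k hkf
    rw [hk k (by omega), hk1 k hkf]
    by_cases hkj : k ∈ js
    · simp only [hkj, decide_true, Bool.true_and, List.any_cons]
      cases flags.getD k false <;> cases decide (r.getD k 0 = 0) <;> simp
    · simp [hkj]

-- ===== VERDICT (by name: the statement is the Claim_ definition above) =====
theorem check_assignment_matrix_spec : Claim_equal_check_assignment_matrix := by
  intro m _ hpre
  unfold Spec_check_assignment_matrix
  unfold check_assignment_matrix check_assignment_matrix_alt
  rw [pvRowsCheckA_eq_all]
  by_cases hall : m.all (fun row => decide ((0 : Int) ∈ row))
  · -- every row contains a zero; Pre_ gives the shape facts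
    have hne : m ≠ [] ∧ ∀ row ∈ m, (m.headD []).length ≤ row.length := by
      rcases hpre with ⟨row, hrm, hrow⟩ | h
      · exact absurd (by simpa using (List.all_eq_true.mp hall row hrm)) hrow
      · exact h
    obtain ⟨r0, rs, rfl⟩ := List.exists_cons_of_ne_nil hne.1
    have hlen : ∀ r ∈ r0 :: rs, r0.length ≤ r.length := by simpa using hne.2
    simp only [hall, if_true, List.head?_cons]
    set n := r0.length with hn
    have hjr : ∀ j ∈ List.range n, ∀ r ∈ r0 :: rs, j < r.length := by
      intro j hj r hr
      have := hlen r hr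
      have := List.mem_range.mp hj
      omega
    rw [pvTransColsA?_eq _ _ hjr]
    obtain ⟨f, hf, hl, hk⟩ := pvMarkRowsB_eq (List.range n) (r0 :: rs)
      (List.replicate n false) (fun r hr j hj => hjr j hj r hr)
    rw [hf]
    show pvRowsCheckA _ = f.all (fun b => b)
    rw [pvRowsCheckA_eq_all]
    simp only [List.length_replicate] at hl hk
    -- both sides say: every column index j < n has a zero in some row
    apply Bool.eq_iff_iff.mpr
    rw [List.all_map]
    rw [List.all_eq_true, List.all_eq_true]
    have hfval : ∀ k, k < n →
        f.getD k false = (r0 :: rs).any (fun r => decide (r.getD k 0 = 0)) := by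
      intro k hkn
      rw [hk k (by omega)]
      simp [List.mem_range.mpr hkn]
    constructor
    · intro hA b hb
      obtain ⟨k, hkf, rfl⟩ := List.mem_iff_getElem.mp hb
      have hkn : k < n := by omega
      have hcol := hA k (List.mem_range.mpr hkn)
      simp only [decide_eq_true_eq, List.mem_map, Function.comp] at hcol
      obtain ⟨r, hr, hr0⟩ := hcol
      have hval : f.getD k false = true := by
        rw [hfval k hkn]
        simp only [List.any_eq_true, decide_eq_true_eq]
        exact ⟨r, hr, hr0⟩
      simpa [List.getD, List.getElem?_eq_getElem hkf] using hval
    · intro hB j hj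
      have hjn : j < n := List.mem_range.mp hj
      have hjf : j < f.length := by omega
      have hfj : f.getD j false = true := by
        have := hB (f[j]'hjf) (List.getElem_mem hjf)
        simpa [List.getD, List.getElem?_eq_getElem hjf] using this
      rw [hfval j hjn] at hfj
      simp only [List.any_eq_true, decide_eq_true_eq] at hfj
      obtain ⟨r, hr, hr0⟩ := hfj
      simp only [Function.comp, decide_eq_true_eq, List.mem_map]
      exact ⟨r, hr, hr0⟩
  · simp [hall]
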